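-- pv_equiv track=rewrite | github.com/2025-II-Infra-ADAII/proyecto-i-ada-ii-return-sinesperanza | project1_ada2/irrigation_plants_pd.py | calcular_costo_tab
-- ===== SOURCE A (Python) =====
-- def calcular_costo_tab(finca, perm):
--     """
--     Calcula el costo total CRFΠ para una permutación dada.
--     (Se usa solo para verificar resultados)
--     """
--     tiempos_inicio = [0] * len(finca)
--     for j in range(1, len(perm)):
--         anterior = perm[j - 1]
--         tiempos_inicio[j] = tiempos_inicio[j - 1] + finca[anterior][1]
--
--     costo_total = 0
--     for idx_perm, i in enumerate(perm):
--         ts, tr, p = finca[i]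
--         fin_riego = tiempos_inicio[idx_perm] + tr
--         penalizacion = p * max(0, fin_riego - ts)
--         costo_total += penalizacion
--
--     return costo_total
-- ===== SOURCE B (Python) =====
-- def calcular_costo_tab(finca, perm):
--     """Single pass: thread a running start-time accumulator instead of
--     building the tiempos_inicio table first."""
--     acc = 0
--     costo_total = 0
--     for i in perm:
--         ts, tr, p = finca[i]
--         fin_riego = acc + tr
--         costo_total += p * max(0, fin_riego - ts)
--         acc = fin_riego
--     return costo_total
-- ===== Notes on version B (the rewrite author's own statement) =====
-- stated objective: simpler
-- what changed: Replaced A's two passes (prefill a tiempos_inicio table of length len(finca), then scan enumerate(perm) reading it) by one loop over perm threading a running start-time accumulator, so the intermediate table disappears.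
import Mathlib
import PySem

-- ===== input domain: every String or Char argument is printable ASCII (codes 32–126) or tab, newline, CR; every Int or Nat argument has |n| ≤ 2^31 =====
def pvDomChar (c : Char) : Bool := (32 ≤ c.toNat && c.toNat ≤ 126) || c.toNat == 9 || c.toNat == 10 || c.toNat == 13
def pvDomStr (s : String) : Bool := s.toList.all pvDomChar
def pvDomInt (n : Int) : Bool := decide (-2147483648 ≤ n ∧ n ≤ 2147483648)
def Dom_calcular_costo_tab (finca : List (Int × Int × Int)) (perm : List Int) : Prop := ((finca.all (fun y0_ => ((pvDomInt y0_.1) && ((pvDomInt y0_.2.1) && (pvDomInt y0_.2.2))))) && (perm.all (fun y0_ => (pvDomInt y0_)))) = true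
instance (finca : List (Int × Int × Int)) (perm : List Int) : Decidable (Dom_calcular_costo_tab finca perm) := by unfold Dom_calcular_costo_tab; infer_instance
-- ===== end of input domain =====

-- B fuses A's two passes into one loop over perm threading a running start-time
-- accumulator, dropping the intermediate tiempos_inicio table (objective: simpler).

-- ===== PORT A =====
-- literal port: first loop fills tiempos_inicio (list writes via pySetD, exact under Pre_),
-- second loop scans enumerate(perm) reading the table.
def calcular_costo_tab (finca : List (Int × Int × Int)) (perm : List Int) : Int :=
  let tiempos_inicio :=
    (PySem.List.pyRange 1 (perm.length : Int) 1).foldl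
      (fun ti j =>
        let anterior := PySem.List.pyGetD perm (j - 1) 0
        PySem.List.pySetD ti j
          (PySem.List.pyGetD ti (j - 1) 0 +
            (PySem.List.pyGetD finca anterior (0, 0, 0)).2.1))
      (List.replicate finca.length (0 : Int))
  (PySem.List.enumerate perm).foldl
    (fun costo_total q =>
      let f := PySem.List.pyGetD finca q.2 (0, 0, 0)
      let fin_riego := PySem.List.pyGetD tiempos_inicio q.1 0 + f.2.1
      costo_total + f.2.2 * max 0 (fin_riego - f.1))
    0

-- ===== PORT B =====
-- one fold over perm; state = (running start time acc, running total cost)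
def calcular_costo_tab_alt (finca : List (Int × Int × Int)) (perm : List Int) : Int :=
  (perm.foldl
    (fun (st : Int × Int) i =>
      let f := PySem.List.pyGetD finca i (0, 0, 0)
      let fin_riego := st.1 + f.2.1
      (fin_riego, st.2 + f.2.2 * max 0 (fin_riego - f.1)))
    (0, 0)).2

-- ===== PRECONDITION & SPEC =====
-- A raises IndexError unless every index of perm is a valid (possibly negative) index
-- into finca and perm is no longer than finca (the tiempos_inicio table has len(finca) slots).
def Pre_calcular_costo_tab (finca : List (Int × Int × Int)) (perm : List Int) : Prop :=
  perm.length ≤ finca.length ∧ ∀ i ∈ perm, PySem.Raise.InRange finca.length i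
instance (finca : List (Int × Int × Int)) (perm : List Int) : Decidable (Pre_calcular_costo_tab finca perm) := by unfold Pre_calcular_costo_tab; infer_instance

def pvWitness_calcular_costo_tab : (List (Int × Int × Int)) × List Int :=
  ([(2, 3, 1), (1, 2, 2)], [1, 0])

def Spec_calcular_costo_tab (finca : List (Int × Int × Int)) (perm : List Int) (out : Int) : Prop := out = calcular_costo_tab_alt finca perm
instance (finca : List (Int × Int × Int)) (perm : List Int) (out : Int) : Decidable (Spec_calcular_costo_tab finca perm out) := by unfold Spec_calcular_costo_tab; infer_instance

-- ===== CLAIM (what is proved, stated in full; the proofs are below) =====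
def Claim_equal_calcular_costo_tab : Prop := ∀ (finca : List (Int × Int × Int)) (perm : List Int), Dom_calcular_costo_tab finca perm → Pre_calcular_costo_tab finca perm → Spec_calcular_costo_tab finca perm (calcular_costo_tab finca perm)
-- ===== LEMMAS AND PROOFS =====

-- tr of the plot indexed by i (total form; exact under Pre_)
def pvTr (finca : List (Int × Int × Int)) (i : Int) : Int :=
  (PySem.List.pyGetD finca i (0, 0, 0)).2.1

-- start time of the k-th watered plot: sum of tr over the first k entries of perm
def pvPref (finca : List (Int × Int × Int)) (perm : List Int) (k : Nat) : Int :=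
  ((perm.map (pvTr finca)).take k).sum

lemma pvPref_succ (finca : List (Int × Int × Int)) (perm : List Int) (k : Nat)
    (hk : k < perm.length) :
    pvPref finca perm (k + 1) = pvPref finca perm k + pvTr finca perm[k] := by
  unfold pvPref
  rw [List.sum_take_succ _ k (by simpa using hk)]
  simp

-- the table built by A's first loop, characterised pointwise
lemma pvTable (finca : List (Int × Int × Int)) (perm : List Int) (n : Nat)
    (hn : n ≤ perm.length) (hL : n ≤ finca.length) :
    (PySem.List.pyRange 1 (n : Int) 1).foldl
      (fun ti j =>
        let anterior := PySem.List.pyGetD perm (j - 1) 0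
        PySem.List.pySetD ti j
          (PySem.List.pyGetD ti (j - 1) 0 +
            (PySem.List.pyGetD finca anterior (0, 0, 0)).2.1))
      (List.replicate finca.length (0 : Int))
    = (List.range finca.length).map
        (fun j => if j < n ∨ j = 0 then pvPref finca perm j else 0) := by
  induction n with
  | zero =>
      rw [PySem.List.pyRange_one_eq_nil (by norm_num)]
      apply List.ext_getElem (by simp)
      intro j h1 h2
      simp only [List.foldl_nil, List.getElem_replicate, List.getElem_map, List.getElem_range]
      rcases Nat.eq_zero_or_pos j with hj | hj
      · simp [hj, pvPref]
      · have hj0 : j ≠ 0 := by omega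
        have hjlt : ¬ j < 0 := by omega
        simp [hj0, hjlt]
  | succ n ih =>
      rcases Nat.eq_zero_or_pos n with hn0 | hnpos
      · subst hn0
        rw [PySem.List.pyRange_one_eq_nil (by norm_num)]
        rw [PySem.List.pyRange_one_eq_nil (by norm_num)] at ih
        rw [ih (by omega) (by omega)]
        apply List.map_congr_left
        intro j _
        have hiff : (j < 1 ∨ j = 0) ↔ (j < 0 ∨ j = 0) := by omega
        simp only [hiff]
      · have h1n : (1 : Int) ≤ (n : Int) := by exact_mod_cast hnpos
        have hrange : PySem.List.pyRange 1 ((n : Nat) + 1 : Int) 1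
            = PySem.List.pyRange 1 (n : Int) 1 ++ [(n : Int)] := by
          have := PySem.List.pyRange_one_succ_right (a := 1) (b := (n : Int)) h1n
          simpa using this
        push_cast
        rw [hrange, List.foldl_append, ih (by omega) (by omega)]
        simp only [List.foldl_cons, List.foldl_nil]
        -- reads inside the step
        have hidx : ((n : Int) - 1) = ((n - 1 : Nat) : Int) := by omega
        have hread : PySem.List.pyGetD
            ((List.range finca.length).map
              (fun j => if j < n ∨ j = 0 then pvPref finca perm j else 0))
            ((n : Int) - 1) 0 = pvPref finca perm (n - 1) := by
          rw [hidx, PySem.List.pyGetD_natCast]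
          rw [List.getD_eq_getElem _ _ (by simp; omega)]
          simp only [List.getElem_map, List.getElem_range]
          rw [if_pos (by omega)]
        have hperm : PySem.List.pyGetD perm ((n : Int) - 1) 0 = perm[n - 1]'(by omega) := by
          rw [hidx, PySem.List.pyGetD_natCast, List.getD_eq_getElem _ _ (by omega)]
        rw [hread, hperm]
        -- the write
        have hset : PySem.List.pySetD
            ((List.range finca.length).map
              (fun j => if j < n ∨ j = 0 then pvPref finca perm j else 0))
            (n : Int)
            (pvPref finca perm (n - 1) + (PySem.List.pyGetD finca (perm[n-1]'(by omega)) (0,0,0)).2.1)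
            = (List.range finca.length).map
                (fun j => if j < n + 1 ∨ j = 0 then pvPref finca perm j else 0) := by
          unfold PySem.List.pySetD
          rw [PySem.List.pySet?_natCast _ _ _ (by simp; omega)]
          simp only [Option.getD_some]
          apply List.ext_getElem (by simp)
          intro j h1 h2
          rw [List.getElem_set]
          simp only [List.getElem_map, List.getElem_range]
          by_cases hj : n = j
          · subst hj
            have hv : pvPref finca perm (n - 1) + (PySem.List.pyGetD finca (perm[n-1]'(by omega)) (0,0,0)).2.1 = pvPref finca perm n := by
              have := pvPref_succ finca perm (n - 1) (by omega)
              rw [Nat.sub_add_cancel hnpos] at this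
              rw [this]; rfl
            rw [if_pos rfl, if_pos (Or.inl (by omega))]
            exact hv
          · rw [if_neg hj]
            have hiff : (j < n ∨ j = 0) ↔ (j < n + 1 ∨ j = 0) := by omega
            simp only [hiff]
        rw [hset]

-- A's second loop over a suffix of perm equals B's fold on that suffix,
-- with the accumulator holding the prefix sum of tr.
lemma pvLoop2 (finca : List (Int × Int × Int)) (perm : List Int)
    (P : Nat) (hPL : P ≤ finca.length) (hP : P = perm.length) :
    ∀ (k : Nat) (c : Int), k ≤ perm.length →
    (PySem.List.enumerate (perm.drop k) (k : Int)).foldl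
      (fun costo_total q =>
        let f := PySem.List.pyGetD finca q.2 (0, 0, 0)
        let fin_riego := PySem.List.pyGetD
            ((List.range finca.length).map
              (fun j => if j < P ∨ j = 0 then pvPref finca perm j else 0)) q.1 0 + f.2.1
        costo_total + f.2.2 * max 0 (fin_riego - f.1)) c
    = ((perm.drop k).foldl
        (fun (st : Int × Int) i =>
          let f := PySem.List.pyGetD finca i (0, 0, 0)
          let fin_riego := st.1 + f.2.1
          (fin_riego, st.2 + f.2.2 * max 0 (fin_riego - f.1)))
        (pvPref finca perm k, c)).2 := by
  intro k
  induction hd : perm.drop k generalizing k with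
  | nil => intro c _; simp [PySem.List.enumerate]
  | cons i xs ih =>
      intro c hk
      have hkP : k < perm.length := by
        by_contra h
        rw [List.drop_eq_nil_of_le (by omega)] at hd
        simp at hd
      rw [List.drop_eq_getElem_cons hkP] at hd
      injection hd with hi hxs
      have hread : PySem.List.pyGetD
          ((List.range finca.length).map
            (fun j => if j < P ∨ j = 0 then pvPref finca perm j else 0)) ((k : Int)) 0
          = pvPref finca perm k := by
        rw [PySem.List.pyGetD_natCast, List.getD_eq_getElem _ _ (by simp; omega)]
        simp only [List.getElem_map, List.getElem_range]
        rw [if_pos (by omega)]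
      have hstep : pvPref finca perm k + (PySem.List.pyGetD finca i (0,0,0)).2.1
          = pvPref finca perm (k + 1) := by
        rw [pvPref_succ finca perm k hkP, hi]; rfl
      rw [PySem.List.enumerate_cons]
      simp only [List.foldl_cons]
      rw [hread]
      have hrec := ih (k + 1) hxs
        (c + (PySem.List.pyGetD finca i (0,0,0)).2.2 *
          max 0 (pvPref finca perm k + (PySem.List.pyGetD finca i (0,0,0)).2.1 - (PySem.List.pyGetD finca i (0,0,0)).1))
        (by omega)
      push_cast at hrec ⊢
      rw [hrec, ← hstep]

-- ===== VERDICT (by name: the statement is the Claim_ definition above) =====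
theorem calcular_costo_tab_spec : Claim_equal_calcular_costo_tab := by
  intro finca perm _ hpre
  obtain ⟨hlen, _⟩ := hpre
  unfold Spec_calcular_costo_tab calcular_costo_tab calcular_costo_tab_alt
  simp only
  rw [pvTable finca perm perm.length le_rfl hlen]
  have := pvLoop2 finca perm perm.length hlen rfl 0 0 (by omega)
  simp only [List.drop_zero, Nat.cast_zero] at this
  rw [this]
  have h0 : pvPref finca perm 0 = 0 := by simp [pvPref]
  rw [h0]
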